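-- pv_equiv track=rewrite | github.com/ghazalehnt/SBR | calc_results.py | group_users_threshold
-- ===== SOURCE A (Python) =====
-- def group_users_threshold(train_user_count, thresholds):
--     groups = {thr: set() for thr in sorted(thresholds)}
--     if len(thresholds) > 0:
--         groups['rest'] = set()
--         for user in train_user_count:
--             added = False
--             for thr in sorted(thresholds):
--                 if train_user_count[user] <= thr:
--                     groups[thr].add(str(user))
--                     added = True
--                     break
--             if not added:
--                 groups['rest'].add(str(user))
--
--     ret_group = {}
--     last = 1
--     for gr in groups:
--         if gr == 'rest':
--             new_gr = f"{last}+"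
--         else:
--             new_gr = f"{last}-{gr}"
--             last = gr + 1
--         ret_group[new_gr] = groups[gr]
--     return ret_group
-- ===== SOURCE B (Python) =====
-- def group_users_threshold(train_user_count, thresholds):
--     if len(thresholds) == 0:
--         return {}
--     thrs = sorted(set(thresholds))
--     n = len(thrs)
--     buckets = [[] for _ in range(n + 1)]
--     for user in train_user_count:
--         cnt = train_user_count[user]
--         # hand-written bisect_left: first index with cnt <= thrs[lo]
--         lo, hi = 0, n
--         while lo < hi:
--             mid = (lo + hi) // 2
--             if thrs[mid] < cnt:
--                 lo = mid + 1
--             else: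
--                 hi = mid
--         buckets[lo].append(str(user))
--     result = {}
--     last = 1
--     for i in range(n):
--         result[f"{last}-{thrs[i]}"] = set(buckets[i])
--         last = thrs[i] + 1
--     result[f"{last}+"] = set(buckets[n])
--     return result
-- ===== Notes on version B (the rewrite author's own statement) =====
-- stated objective: faster
-- what changed: A re-sorts the threshold list for every user and linearly scans it with a break; B sorts and dedups the thresholds once, finds each user's bucket with a hand-written bisect_left binary search into an index-addressed bucket array, and emits the labelled groups in one final pass.
import Mathlib
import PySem

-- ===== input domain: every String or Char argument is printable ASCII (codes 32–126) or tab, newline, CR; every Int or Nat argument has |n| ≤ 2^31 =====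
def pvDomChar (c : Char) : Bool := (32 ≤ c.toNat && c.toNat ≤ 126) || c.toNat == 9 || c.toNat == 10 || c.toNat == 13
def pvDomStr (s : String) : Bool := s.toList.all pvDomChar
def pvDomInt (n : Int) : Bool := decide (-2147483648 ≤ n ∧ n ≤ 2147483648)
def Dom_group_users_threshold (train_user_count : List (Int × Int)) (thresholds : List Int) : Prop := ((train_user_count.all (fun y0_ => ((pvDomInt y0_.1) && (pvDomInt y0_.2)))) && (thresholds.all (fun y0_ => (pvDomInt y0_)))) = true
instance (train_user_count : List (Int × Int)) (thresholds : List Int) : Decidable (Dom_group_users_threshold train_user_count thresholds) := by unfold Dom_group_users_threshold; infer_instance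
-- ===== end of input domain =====

-- B replaces A's per-user re-sort + linear break-scan over the thresholds by one sort/dedup up front
-- and a hand-written binary search (bisect_left) per user into an indexed bucket array: same return
-- value, measurably faster (objective: faster).


-- ===== PORT A =====
-- 'groups' is a Python dict whose keys are the int thresholds plus the string 'rest': modelled as
-- PySem.Dict (Option Int) _, 'rest' = none.  'for user in train_user_count: train_user_count[user]'
-- iterates the dict's (key, value) pairs in order, so it is ported as a fold over the pairs.
-- 'groups[thr].add(x)' (key always present) is Dict.modify with an unused default.
def group_users_threshold (train_user_count : List (Int × Int)) (thresholds : List Int) : List (String × List String) :=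
  let groups : PySem.Dict (Option Int) (PySem.Set String) :=
    (PySem.List.sorted thresholds (fun x => x) false).foldl
      (fun d thr => d.insert (some thr) PySem.Set.empty) PySem.Dict.empty
  let groups :=
    if thresholds.length > 0 then
      let groups := groups.insert none PySem.Set.empty
      train_user_count.foldl (fun g p =>
        -- inner 'for thr in sorted(thresholds): … break' with the 'added' flag
        let r := (PySem.List.sorted thresholds (fun x => x) false).foldl
          (fun (acc : PySem.Dict (Option Int) (PySem.Set String) × Bool) thr =>
            if acc.2 then acc
            else if p.2 ≤ thr then
              (acc.1.modify (some thr) PySem.Set.empty (fun s => PySem.Set.add s (PySem.Int.toStr p.1)), true)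
            else acc) (g, false)
        if r.2 then r.1
        else r.1.modify none PySem.Set.empty (fun s => PySem.Set.add s (PySem.Int.toStr p.1))) groups
    else groups
  (groups.items.foldl (fun (acc : List (String × List String) × Int) kv =>
      match kv.1 with
      | some gr => (acc.1 ++ [(PySem.Int.toStr acc.2 ++ "-" ++ PySem.Int.toStr gr, (kv.2 : List String))], gr + 1)
      | none => (acc.1 ++ [(PySem.Int.toStr acc.2 ++ "+", (kv.2 : List String))], acc.2)) ([], (1 : Int))).1

-- ===== PORT B =====
-- Source B's hand-written bisect_left while-loop is exactly PySem.List.bisectLeft (Python's bisect_left loop).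
-- 'buckets[lo].append(…)' with lo always in range is List.set / getD with an unused default.
def group_users_threshold_alt (train_user_count : List (Int × Int)) (thresholds : List Int) : List (String × List String) :=
  if thresholds.length = 0 then []
  else
    let thrs := PySem.List.sorted (PySem.Set.ofList thresholds) (fun x => x) false
    let n := thrs.length
    let buckets : List (List String) := List.replicate (n + 1) []
    let buckets := train_user_count.foldl (fun bs p =>
        let lo := PySem.List.bisectLeft thrs p.2
        bs.set lo (bs.getD lo [] ++ [PySem.Int.toStr p.1])) buckets
    let res := (thrs.zip buckets).foldl
      (fun (acc : List (String × List String) × Int) tb =>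
        (acc.1 ++ [(PySem.Int.toStr acc.2 ++ "-" ++ PySem.Int.toStr tb.1, PySem.Set.ofList tb.2)], tb.1 + 1))
      ([], (1 : Int))
    res.1 ++ [(PySem.Int.toStr res.2 ++ "+", PySem.Set.ofList (buckets.getD n []))]

-- ===== PRECONDITION & SPEC =====
def Spec_group_users_threshold (train_user_count : List (Int × Int)) (thresholds : List Int) (out : List (String × List String)) : Prop := out = group_users_threshold_alt train_user_count thresholds
instance (train_user_count : List (Int × Int)) (thresholds : List Int) (out : List (String × List String)) : Decidable (Spec_group_users_threshold train_user_count thresholds out) := by unfold Spec_group_users_threshold; infer_instance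

-- ===== CLAIM (what is proved, stated in full; the proofs are below) =====
def Claim_equal_group_users_threshold : Prop := ∀ (train_user_count : List (Int × Int)) (thresholds : List Int), Dom_group_users_threshold train_user_count thresholds → Spec_group_users_threshold train_user_count thresholds (group_users_threshold train_user_count thresholds)

-- ===== LEMMAS AND PROOFS =====
-- ===== proof-only helpers =====
def pvSt (ths : List Int) : List Int := PySem.List.sorted ths (fun x => x) false
def pvThrs (ths : List Int) : List Int := PySem.List.sorted (PySem.Set.ofList ths) (fun x => x) false
def pvAkey (ths : List Int) (c : Int) : Option Int := (pvSt ths).find? (fun t => decide (c ≤ t))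
def pvAsgn (ths : List Int) (c : Int) : Nat := PySem.List.bisectLeft (pvThrs ths) c

lemma set_update_sublist {α : Type} [BEq α] (l S : List α) :
    (PySem.Set.update S l).Sublist (S ++ l) := by
  induction l generalizing S with
  | nil => simp [PySem.Set.update]
  | cons h t ih =>
    have := ih (PySem.Set.add S h)
    simp only [PySem.Set.update, List.foldl_cons] at this ⊢
    by_cases hc : PySem.Set.contains S h = true
    · rw [show PySem.Set.add S h = S from if_pos hc] at this ⊢
      exact this.trans ((List.append_sublist_append_left S).mpr (List.sublist_cons_self h t))
    · rw [show PySem.Set.add S h = S ++ [h] from if_neg hc] at this ⊢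
      simpa using this

lemma set_ofList_sublist {α : Type} [BEq α] (l : List α) :
    (PySem.Set.ofList l).Sublist l := by
  simpa [PySem.Set.ofList, PySem.Set.update] using set_update_sublist l []

lemma pvThrs_eq (ths : List Int) : pvThrs ths = PySem.Set.ofList (pvSt ths) := by
  apply PySem.List.sorted_eq_of_perm_of_pairwise_lt
  · apply (List.perm_ext_iff_of_nodup (PySem.Set.nodup_ofList _) (PySem.Set.nodup_ofList _)).mpr
    intro x
    simp [PySem.Set.mem_ofList, pvSt, PySem.List.mem_sorted]
  · have hsub := set_ofList_sublist (pvSt ths)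
    have hle : (PySem.Set.ofList (pvSt ths)).Pairwise (· ≤ ·) :=
      (PySem.List.sorted_pairwise ths (fun x => x)).sublist hsub
    have hne : (PySem.Set.ofList (pvSt ths)).Pairwise (· ≠ ·) := PySem.Set.nodup_ofList _
    exact (hle.and hne).imp (fun h => lt_of_le_of_ne h.1 h.2)

lemma pvThrs_lt (ths : List Int) : (pvThrs ths).Pairwise (· < ·) :=
  PySem.List.sorted_ofList_pairwise_lt ths

lemma find?_sorted_min {l : List Int} {c m : Int} (hs : l.Pairwise (· ≤ ·))
    (hm : m ∈ l) (hc : c ≤ m) (hmin : ∀ y ∈ l, c ≤ y → m ≤ y) :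
    l.find? (fun t => decide (c ≤ t)) = some m := by
  induction l with
  | nil => cases hm
  | cons h t ih =>
    by_cases hch : c ≤ h
    · have h1 : m ≤ h := hmin h (List.mem_cons_self) hch
      have h2 : h ≤ m := by
        rcases List.mem_cons.mp hm with rfl | hmt
        · exact le_refl _
        · exact (List.pairwise_cons.mp hs).1 m hmt
      simp [hch, le_antisymm h1 h2]
    · have hmt : m ∈ t := by
        rcases List.mem_cons.mp hm with rfl | hmt
        · exact absurd hc hch
        · exact hmt
      rw [List.find?_cons_of_neg (by simpa using hch)]
      exact ih (List.pairwise_cons.mp hs).2 hmt (fun y hy => hmin y (List.mem_cons_of_mem _ hy))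

lemma mem_st_iff_mem_thrs (ths : List Int) (y : Int) : y ∈ pvSt ths ↔ y ∈ pvThrs ths := by
  simp [pvSt, pvThrs, PySem.List.mem_sorted, PySem.Set.mem_ofList]

lemma pvAsgn_le (ths : List Int) (c : Int) : pvAsgn ths c ≤ (pvThrs ths).length :=
  (PySem.List.bisectLeft_spec _ c ((pvThrs_lt ths).imp le_of_lt)).1

lemma pvAkey_eq_bridge (ths : List Int) (c : Int) :
    pvAkey ths c = (pvThrs ths)[pvAsgn ths c]? := by
  obtain ⟨h1, h2, h3⟩ := PySem.List.bisectLeft_spec (pvThrs ths) c ((pvThrs_lt ths).imp le_of_lt)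
  unfold pvAsgn
  set bl := PySem.List.bisectLeft (pvThrs ths) c with hbl
  rcases lt_or_eq_of_le h1 with hlt | heq
  · rw [List.getElem?_eq_getElem hlt]
    apply find?_sorted_min (PySem.List.sorted_pairwise ths (fun x => x))
    · exact (mem_st_iff_mem_thrs ths _).mpr (List.getElem_mem hlt)
    · exact h3 bl hlt (le_refl _)
    · intro y hy hcy
      obtain ⟨j, hj, rfl⟩ := List.mem_iff_getElem.mp ((mem_st_iff_mem_thrs ths _).mp hy)
      rcases lt_or_ge j bl with hjlt | hjge
      · exact absurd hcy (not_le.mpr (h2 j hj hjlt))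
      · exact PySem.List.sorted_id_getElem_mono _ hjge hj
  · rw [heq, List.getElem?_eq_none (le_refl _)]
    apply List.find?_eq_none.mpr
    intro y hy
    obtain ⟨j, hj, rfl⟩ := List.mem_iff_getElem.mp ((mem_st_iff_mem_thrs ths _).mp hy)
    simpa using h2 j hj (heq ▸ hj)

-- flag already set: the break-loop does nothing
lemma inner_flag_true (st : List Int) (c : Int) (u : Int)
    (acc : PySem.Dict (Option Int) (PySem.Set String) × Bool) (h : acc.2 = true) :
    st.foldl (fun acc thr =>
        if acc.2 then acc
        else if c ≤ thr then
          (acc.1.modify (some thr) PySem.Set.empty (fun s => PySem.Set.add s (PySem.Int.toStr u)), true)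
        else acc) acc = acc := by
  induction st with
  | nil => rfl
  | cons hd t ih => rw [List.foldl_cons, if_pos h]; exact ih

-- L4: the inner for/break loop is find?
lemma inner_break (st : List Int) (c : Int) (u : Int) (g : PySem.Dict (Option Int) (PySem.Set String)) :
    st.foldl (fun acc thr =>
        if acc.2 then acc
        else if c ≤ thr then
          (acc.1.modify (some thr) PySem.Set.empty (fun s => PySem.Set.add s (PySem.Int.toStr u)), true)
        else acc) (g, false)
    = match st.find? (fun t => decide (c ≤ t)) with
      | some t => (g.modify (some t) PySem.Set.empty (fun s => PySem.Set.add s (PySem.Int.toStr u)), true)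
      | none => (g, false) := by
  induction st generalizing g with
  | nil => rfl
  | cons hd t ih =>
    by_cases hc : c ≤ hd
    · rw [List.foldl_cons]
      simp only [Bool.false_eq_true, if_false, hc, if_true]
      rw [inner_flag_true t c u _ rfl, List.find?_cons_of_pos (by simpa using hc)]
    · rw [List.foldl_cons]
      simp only [Bool.false_eq_true, if_false, hc]
      rw [ih g, List.find?_cons_of_neg (by simpa using hc)]

-- L3: items of the initialising insert loop (generalised over the accumulated key set)
lemma init_items_gen (st : List Int) : ∀ (S : List Int),
    ((st.foldl (fun d thr => d.insert (some thr) PySem.Set.empty)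
        (PySem.Dict.mk (S.map (fun t => ((some t : Option Int), (PySem.Set.empty : PySem.Set String))))))).items
    = (PySem.Set.update S st).map (fun t => ((some t : Option Int), (PySem.Set.empty : PySem.Set String))) := by
  induction st with
  | nil => intro S; rfl
  | cons hd t ih =>
    intro S
    rw [List.foldl_cons]
    have hkeys : (PySem.Dict.mk (S.map (fun t => ((some t : Option Int), (PySem.Set.empty : PySem.Set String))))).keys
        = S.map some := by
      simp [PySem.Dict.keys, List.map_map]
    by_cases hm : hd ∈ S
    · have hcon : (PySem.Dict.mk (S.map (fun t => ((some t : Option Int), (PySem.Set.empty : PySem.Set String))))).contains (some hd) = true := by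
        rw [PySem.Dict.contains_iff_mem_keys, hkeys]; exact List.mem_map_of_mem hm
      have hins : (PySem.Dict.mk (S.map (fun t => ((some t : Option Int), (PySem.Set.empty : PySem.Set String))))).insert (some hd) PySem.Set.empty
          = PySem.Dict.mk (S.map (fun t => ((some t : Option Int), (PySem.Set.empty : PySem.Set String)))) := by
        apply PySem.Dict.ext
        rw [PySem.Dict.items_insert_of_contains _ _ hcon]
        show List.map _ (S.map _) = _
        rw [List.map_map]
        apply List.map_congr_left
        intro a _
        by_cases hah : a = hd
        · subst hah; simp
        · simp [Function.comp, hah]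
      rw [hins, ih S]
      have : PySem.Set.add S hd = S := by simp [PySem.Set.add, PySem.Set.contains, hm]
      simp [PySem.Set.update, List.foldl_cons, this]
    · have hcon : (PySem.Dict.mk (S.map (fun t => ((some t : Option Int), (PySem.Set.empty : PySem.Set String))))).contains (some hd) = false := by
        rw [← Bool.not_eq_true, PySem.Dict.contains_iff_mem_keys, hkeys]
        simpa using hm
      have hins : (PySem.Dict.mk (S.map (fun t => ((some t : Option Int), (PySem.Set.empty : PySem.Set String))))).insert (some hd) PySem.Set.empty
          = PySem.Dict.mk ((S ++ [hd]).map (fun t => ((some t : Option Int), (PySem.Set.empty : PySem.Set String)))) := by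
        apply PySem.Dict.ext
        rw [PySem.Dict.items_insert_of_not_contains _ _ hcon]
        simp
      rw [hins, ih (S ++ [hd])]
      have : PySem.Set.add S hd = S ++ [hd] := by simp [PySem.Set.add, PySem.Set.contains, hm]
      simp [PySem.Set.update, List.foldl_cons, this]

-- L5: the user loop keeps the dict's items in key-indexed shape
lemma users_fold_items (key : Int × Int → Option Int) (kl : List (Option Int)) (hnd : kl.Nodup)
    (hin : ∀ p : Int × Int, key p ∈ kl) (us : List (Int × Int)) :
    ∀ (v : Option Int → PySem.Set String),
    ((us.foldl (fun g p => g.modify (key p) PySem.Set.empty (fun s => PySem.Set.add s (PySem.Int.toStr p.1)))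
        (PySem.Dict.mk (kl.map (fun k => (k, v k)))))).items
    = kl.map (fun k => (k, us.foldl
        (fun s p => if key p = k then PySem.Set.add s (PySem.Int.toStr p.1) else s) (v k))) := by
  induction us with
  | nil => intro v; rfl
  | cons p rest ih =>
    intro v
    rw [List.foldl_cons]
    have hkeys : (PySem.Dict.mk (kl.map (fun k => (k, v k)))).keys = kl := by
      simp only [PySem.Dict.keys]
      show List.map _ (kl.map _) = kl
      rw [List.map_map]
      simp [Function.comp_def]
    have hknd : (PySem.Dict.mk (kl.map (fun k => (k, v k)))).keys.Nodup := by rw [hkeys]; exact hnd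
    have hcon : (PySem.Dict.mk (kl.map (fun k => (k, v k)))).contains (key p) = true := by
      rw [PySem.Dict.contains_iff_mem_keys, hkeys]; exact hin p
    have hgetD : (PySem.Dict.mk (kl.map (fun k => (k, v k)))).getD (key p) PySem.Set.empty = v (key p) :=
      PySem.Dict.getD_of_mem_items _ (List.mem_map_of_mem (f := fun k => (k, v k)) (hin p)) hknd _
    have hmod : (PySem.Dict.mk (kl.map (fun k => (k, v k)))).modify (key p) PySem.Set.empty
          (fun s => PySem.Set.add s (PySem.Int.toStr p.1))
        = PySem.Dict.mk (kl.map (fun k => (k,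
            if key p = k then PySem.Set.add (v k) (PySem.Int.toStr p.1) else v k))) := by
      apply PySem.Dict.ext
      show (PySem.Dict.insert _ _ _).items = _
      rw [hgetD, PySem.Dict.items_insert_of_contains _ _ hcon]
      show List.map _ (kl.map _) = _
      rw [List.map_map]
      apply List.map_congr_left
      intro k _
      by_cases hk : key p = k
      · simp [Function.comp, hk]
      · simp [Function.comp, Ne.symm hk, hk]
    rw [hmod, ih]
    exact (List.map_congr_left (fun k _ => by rw [List.foldl_cons])).symm

-- fold of conditional add = Set.update with the filtered, mapped sublist
lemma fold_if_add (key : Int × Int → Option Int) (k : Option Int) (us : List (Int × Int)) :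
    ∀ (S : PySem.Set String),
    us.foldl (fun s p => if key p = k then PySem.Set.add s (PySem.Int.toStr p.1) else s) S
    = PySem.Set.update S ((us.filter (fun p => key p == k)).map (fun p => PySem.Int.toStr p.1)) := by
  induction us with
  | nil => intro S; rfl
  | cons p rest ih =>
    intro S
    by_cases hk : key p = k
    · simp [List.foldl_cons, hk, ih, PySem.Set.update]
    · simp [List.foldl_cons, hk, ih, PySem.Set.update]

-- key-comparison bridges between A's found threshold and B's bucket index
lemma pvThrs_nodup (ths : List Int) : (pvThrs ths).Nodup :=
  (pvThrs_lt ths).imp ne_of_lt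

lemma akey_eq_some_iff (ths : List Int) (c : Int) (i : Nat) (hi : i < (pvThrs ths).length) :
    pvAkey ths c = some ((pvThrs ths)[i]) ↔ pvAsgn ths c = i := by
  rw [pvAkey_eq_bridge]
  constructor
  · intro h
    rcases lt_or_eq_of_le (pvAsgn_le ths c) with hlt | heq
    · rw [List.getElem?_eq_getElem hlt, Option.some_inj] at h
      exact (List.Nodup.getElem_inj_iff (pvThrs_nodup ths)).mp h
    · rw [heq, List.getElem?_eq_none (le_refl _)] at h
      cases h
  · rintro rfl
    rw [List.getElem?_eq_getElem hi]

lemma akey_eq_none_iff (ths : List Int) (c : Int) :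
    pvAkey ths c = none ↔ pvAsgn ths c = (pvThrs ths).length := by
  rw [pvAkey_eq_bridge, List.getElem?_eq_none_iff]
  exact ⟨fun h => le_antisymm (pvAsgn_le ths c) h, fun h => le_of_eq h.symm⟩

lemma akey_mem_kl (ths : List Int) (p : Int × Int) :
    pvAkey ths p.2 ∈ (pvThrs ths).map some ++ [(none : Option Int)] := by
  rw [pvAkey_eq_bridge]
  rcases lt_or_eq_of_le (pvAsgn_le ths p.2) with hlt | heq
  · rw [List.getElem?_eq_getElem hlt]
    exact List.mem_append_left _ (List.mem_map_of_mem (List.getElem_mem hlt))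
  · rw [heq, List.getElem?_eq_none (le_refl _)]
    simp

lemma kl_nodup (ths : List Int) : ((pvThrs ths).map some ++ [(none : Option Int)]).Nodup := by
  rw [List.nodup_append]
  refine ⟨(pvThrs_nodup ths).map (Option.some_injective _), List.nodup_singleton _, ?_⟩
  simp

-- L6a: the bucket-array loop preserves length
lemma bfold_length (ths : List Int) (us : List (Int × Int)) :
    ∀ (b : List (List String)),
    (us.foldl (fun bs p => bs.set (pvAsgn ths p.2)
        (bs.getD (pvAsgn ths p.2) [] ++ [PySem.Int.toStr p.1])) b).length
    = b.length := by
  induction us with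
  | nil => intro b; rfl
  | cons p rest ih => intro b; rw [List.foldl_cons, ih, List.length_set]

-- L6b: elementwise contents of the bucket-array loop
lemma bfold_getD (ths : List Int) (us : List (Int × Int)) :
    ∀ (b : List (List String)) (i : Nat), i < b.length →
    (∀ p ∈ us, pvAsgn ths p.2 < b.length) →
    (us.foldl (fun bs p => bs.set (pvAsgn ths p.2)
        (bs.getD (pvAsgn ths p.2) [] ++ [PySem.Int.toStr p.1])) b).getD i []
    = b.getD i [] ++ (us.filter (fun p => pvAsgn ths p.2 == i)).map (fun p => PySem.Int.toStr p.1) := by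
  induction us with
  | nil => intro b i hi _; simp
  | cons p rest ih =>
    intro b i hi hall
    rw [List.foldl_cons, List.filter_cons]
    have hlo : pvAsgn ths p.2 < b.length := hall p List.mem_cons_self
    have hlen : (b.set (pvAsgn ths p.2) (b.getD (pvAsgn ths p.2) [] ++ [PySem.Int.toStr p.1])).length = b.length :=
      List.length_set ..
    have := ih (b.set (pvAsgn ths p.2) (b.getD (pvAsgn ths p.2) [] ++ [PySem.Int.toStr p.1])) i
      (by rw [hlen]; exact hi) (fun q hq => by rw [hlen]; exact hall q (List.mem_cons_of_mem _ hq))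
    rw [this]
    by_cases hip : pvAsgn ths p.2 = i
    · subst hip
      rw [List.getD_eq_getElem _ _ (by rw [hlen]; exact hlo), List.getElem_set_self]
      simp
    · have : (b.set (pvAsgn ths p.2) (b.getD (pvAsgn ths p.2) [] ++ [PySem.Int.toStr p.1])).getD i [] = b.getD i [] := by
        rcases lt_or_ge i b.length with h | h
        · rw [List.getD_eq_getElem _ _ (by rw [hlen]; exact h), List.getD_eq_getElem _ _ h]
          exact List.getElem_set_ne (by omega) _
        · rw [List.getD_eq_default _ _ (by rw [hlen]; exact h), List.getD_eq_default _ _ h]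
      rw [this]
      simp [hip]

-- L7: the two label loops agree (A over key-tagged items, B over pairs + a final append)
lemma finloop (L : List (Int × List String)) (R : List String) :
    ∀ (acc : List (String × List String)) (last : Int),
    ((L.map (fun q => ((some q.1 : Option Int), PySem.Set.ofList q.2)) ++ [((none : Option Int), PySem.Set.ofList R)]).foldl
        (fun (acc : List (String × List String) × Int) kv =>
          match kv.1 with
          | some gr => (acc.1 ++ [(PySem.Int.toStr acc.2 ++ "-" ++ PySem.Int.toStr gr, (kv.2 : List String))], gr + 1)
          | none => (acc.1 ++ [(PySem.Int.toStr acc.2 ++ "+", (kv.2 : List String))], acc.2)) (acc, last)).1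
    = (L.foldl (fun (acc : List (String × List String) × Int) tb =>
          (acc.1 ++ [(PySem.Int.toStr acc.2 ++ "-" ++ PySem.Int.toStr tb.1, PySem.Set.ofList tb.2)], tb.1 + 1)) (acc, last)).1
      ++ [(PySem.Int.toStr (L.foldl (fun (acc : List (String × List String) × Int) tb =>
          (acc.1 ++ [(PySem.Int.toStr acc.2 ++ "-" ++ PySem.Int.toStr tb.1, PySem.Set.ofList tb.2)], tb.1 + 1)) (acc, last)).2 ++ "+",
          PySem.Set.ofList R)] := by
  induction L with
  | nil => intro acc last; rfl
  | cons q t ih => intro acc last; rw [List.map_cons, List.cons_append, List.foldl_cons, List.foldl_cons]; exact ih _ _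

-- the two filter predicates agree
lemma pred_some_eq (ths : List Int) (i : Nat) (hi : i < (pvThrs ths).length) :
    (fun p : Int × Int => pvAkey ths p.2 == some ((pvThrs ths)[i]))
    = (fun p : Int × Int => pvAsgn ths p.2 == i) := by
  funext p
  rw [Bool.eq_iff_iff, beq_iff_eq, beq_iff_eq]
  exact akey_eq_some_iff ths p.2 i hi

lemma pred_none_eq (ths : List Int) :
    (fun p : Int × Int => pvAkey ths p.2 == (none : Option Int))
    = (fun p : Int × Int => pvAsgn ths p.2 == (pvThrs ths).length) := by
  funext p
  rw [Bool.eq_iff_iff, beq_iff_eq, beq_iff_eq]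
  exact akey_eq_none_iff ths p.2

theorem group_ab (tuc : List (Int × Int)) (ths : List Int) :
    group_users_threshold tuc ths = group_users_threshold_alt tuc ths := by
  by_cases hths : ths.length = 0
  · have h0 : ths = [] := List.length_eq_zero_iff.mp hths
    subst h0
    rfl
  · simp only [group_users_threshold, group_users_threshold_alt, if_neg hths,
      if_pos (Nat.pos_of_ne_zero hths)]
    rw [show (PySem.List.sorted ths fun x => x) = pvSt ths from rfl,
        show (PySem.List.sorted (PySem.Set.ofList ths) fun x => x) = pvThrs ths from rfl,
        show (fun (bs : List (List String)) (p : Int × Int) =>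
            bs.set (PySem.List.bisectLeft (pvThrs ths) p.2)
              (bs.getD (PySem.List.bisectLeft (pvThrs ths) p.2) [] ++ [PySem.Int.toStr p.1]))
          = (fun (bs : List (List String)) (p : Int × Int) =>
            bs.set (pvAsgn ths p.2) (bs.getD (pvAsgn ths p.2) [] ++ [PySem.Int.toStr p.1])) from rfl]
    -- the user loop's body is one modify at the found key
    have hstep : (fun (g : PySem.Dict (Option Int) (PySem.Set String)) (p : Int × Int) =>
        if (List.foldl (fun acc thr =>
              if acc.2 = true then acc
              else if p.2 ≤ thr then
                (acc.1.modify (some thr) PySem.Set.empty fun s => s.add (PySem.Int.toStr p.1), true)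
              else acc) (g, false) (pvSt ths)).2 = true then
          (List.foldl (fun acc thr =>
              if acc.2 = true then acc
              else if p.2 ≤ thr then
                (acc.1.modify (some thr) PySem.Set.empty fun s => s.add (PySem.Int.toStr p.1), true)
              else acc) (g, false) (pvSt ths)).1
        else
          (List.foldl (fun acc thr =>
              if acc.2 = true then acc
              else if p.2 ≤ thr then
                (acc.1.modify (some thr) PySem.Set.empty fun s => s.add (PySem.Int.toStr p.1), true)
              else acc) (g, false) (pvSt ths)).1.modify none PySem.Set.empty
            fun s => s.add (PySem.Int.toStr p.1))
        = fun g p => g.modify (pvAkey ths p.2) PySem.Set.empty (fun s => PySem.Set.add s (PySem.Int.toStr p.1)) := by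
      funext g p
      rw [inner_break (pvSt ths) p.2 p.1 g]
      cases hf : (pvSt ths).find? (fun t => decide (p.2 ≤ t)) with
      | some t => simp [pvAkey, hf]
      | none => simp [pvAkey, hf]
    rw [hstep]
    -- the initial dict in indexed shape
    have hinit : ((List.foldl (fun d thr => d.insert (some thr) PySem.Set.empty) PySem.Dict.empty (pvSt ths)).insert none PySem.Set.empty)
        = PySem.Dict.mk ((((pvThrs ths).map some) ++ [(none : Option Int)]).map
            (fun k => (k, (PySem.Set.empty : PySem.Set String)))) := by
      have h1 : (List.foldl (fun d thr => d.insert (some thr) PySem.Set.empty) PySem.Dict.empty (pvSt ths)).items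
          = (pvThrs ths).map (fun t => ((some t : Option Int), (PySem.Set.empty : PySem.Set String))) := by
        rw [pvThrs_eq]
        exact init_items_gen (pvSt ths) []
      have hcon : (List.foldl (fun d thr => d.insert (some thr) PySem.Set.empty)
          (PySem.Dict.empty : PySem.Dict (Option Int) (PySem.Set String)) (pvSt ths)).contains (none : Option Int) = false := by
        rw [← Bool.not_eq_true, PySem.Dict.contains_iff_mem_keys]
        show (none : Option Int) ∉ List.map _ _
        rw [h1, List.map_map]
        simp [Function.comp_def]
      apply PySem.Dict.ext
      rw [PySem.Dict.items_insert_of_not_contains _ _ hcon, h1]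
      simp [List.map_append, List.map_map, Function.comp_def]
    rw [hinit,
      users_fold_items (fun p => pvAkey ths p.2) (((pvThrs ths).map some) ++ [(none : Option Int)])
        (kl_nodup ths) (akey_mem_kl ths) tuc (fun _ => PySem.Set.empty)]
    -- each accumulated set is the set of the filtered user list
    rw [show (fun (k : Option Int) => (k, List.foldl
          (fun s p => if pvAkey ths p.2 = k then PySem.Set.add s (PySem.Int.toStr p.1) else s)
          (PySem.Set.empty) tuc))
        = (fun (k : Option Int) => (k, PySem.Set.ofList
            ((tuc.filter (fun p => pvAkey ths p.2 == k)).map (fun p => PySem.Int.toStr p.1)))) from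
      funext fun k => by rw [fold_if_add (fun p => pvAkey ths p.2) k tuc PySem.Set.empty]; rfl]
    rw [List.map_append, List.map_map, List.map_singleton]
    -- identify A's per-threshold sets with B's buckets
    have hblen : (List.foldl (fun bs p =>
          bs.set (pvAsgn ths p.2) (bs.getD (pvAsgn ths p.2) [] ++ [PySem.Int.toStr p.1]))
        (List.replicate ((pvThrs ths).length + 1) []) tuc).length = (pvThrs ths).length + 1 := by
      rw [bfold_length, List.length_replicate]
    have hall : ∀ p ∈ tuc, pvAsgn ths p.2 < (List.replicate ((pvThrs ths).length + 1) ([] : List String)).length := by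
      intro p _
      rw [List.length_replicate]
      exact Nat.lt_succ_of_le (pvAsgn_le ths p.2)
    have hbget : ∀ i, i < (pvThrs ths).length + 1 →
        (List.foldl (fun bs p =>
            bs.set (pvAsgn ths p.2) (bs.getD (pvAsgn ths p.2) [] ++ [PySem.Int.toStr p.1]))
          (List.replicate ((pvThrs ths).length + 1) []) tuc).getD i []
        = (tuc.filter (fun p => pvAsgn ths p.2 == i)).map (fun p => PySem.Int.toStr p.1) := by
      intro i hi
      rw [bfold_getD ths tuc _ i (by rwa [List.length_replicate]) hall,
        List.getD_eq_getElem _ _ (by rwa [List.length_replicate]), List.getElem_replicate,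
        List.nil_append]
    have hmap : List.map ((fun k => (k, PySem.Set.ofList
          ((tuc.filter (fun p => pvAkey ths p.2 == k)).map (fun p => PySem.Int.toStr p.1)))) ∘ some) (pvThrs ths)
        = ((pvThrs ths).zip (List.foldl (fun bs p =>
              bs.set (pvAsgn ths p.2) (bs.getD (pvAsgn ths p.2) [] ++ [PySem.Int.toStr p.1]))
            (List.replicate ((pvThrs ths).length + 1) []) tuc)).map
          (fun q => ((some q.1 : Option Int), PySem.Set.ofList q.2)) := by
      apply List.ext_getElem
      · rw [List.length_map, List.length_map, List.length_zip, hblen]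
        omega
      · intro i hi1 hi2
        have hi : i < (pvThrs ths).length := by rwa [List.length_map] at hi1
        rw [List.getElem_map, List.getElem_map, List.getElem_zip]
        show (some ((pvThrs ths)[i]), _) = (some ((pvThrs ths)[i]), _)
        have hib : i < (List.foldl (fun bs p =>
            bs.set (pvAsgn ths p.2) (bs.getD (pvAsgn ths p.2) [] ++ [PySem.Int.toStr p.1]))
          (List.replicate ((pvThrs ths).length + 1) []) tuc).length := by rw [hblen]; omega
        rw [Prod.mk.injEq]
        refine ⟨rfl, ?_⟩
        rw [← List.getD_eq_getElem _ ([] : List String) hib, hbget i (by omega),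
          pred_some_eq ths i hi]
    have hrest : PySem.Set.ofList ((tuc.filter (fun p => pvAkey ths p.2 == (none : Option Int))).map
          (fun p => PySem.Int.toStr p.1))
        = PySem.Set.ofList ((List.foldl (fun bs p =>
              bs.set (pvAsgn ths p.2) (bs.getD (pvAsgn ths p.2) [] ++ [PySem.Int.toStr p.1]))
            (List.replicate ((pvThrs ths).length + 1) []) tuc).getD (pvThrs ths).length []) := by
      rw [hbget _ (Nat.lt_succ_self _), pred_none_eq ths]
    rw [hmap, hrest]
    exact finloop _ _ [] 1


-- ===== VERDICT (by name: the statement is the Claim_ definition above) =====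
theorem group_users_threshold_spec : Claim_equal_group_users_threshold := by
  intro tuc ths _
  unfold Spec_group_users_threshold
  exact group_ab tuc ths
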